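-- pv_equiv track=rewrite | github.com/Zabolekar/budivelnyk | src/budivelnyk/__init__.py | generate_x86_64_att
-- ===== SOURCE A (Python) =====
-- from typing import Iterator
--
-- def fill_jump_tables(intermediate: list[str]) -> dict[int, int]:
--     jumps = {}
--     stack = []
--     for i, command in enumerate(intermediate):
--         if command == '[':
--             stack.append(i)
--         elif command == ']':
--             j = stack.pop()
--             jumps[j] = i
--             jumps[i] = j
--     return jumps
--
-- def generate_x86_64_att(intermediate: list[str]) -> Iterator[str]:
--     jumps = fill_jump_tables(intermediate)
--
--     yield ".globl run"
--     yield ".type run, @function"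
--     yield "run:"
--
--     for i, command in enumerate(intermediate):
--         n = len(command)
--
--         if command.startswith("+"):
--             if n == 1:
--                 yield "incb (%rdi)"
--             else:
--                 yield f"addb ${n}, (%rdi)"
--         elif command.startswith("-"):
--             if n == 1:
--                 yield "decb (%rdi)"
--             else:
--                 yield f"subb ${n}, (%rdi)"
--         elif command.startswith(">"):
--             if n == 1:
--                 yield "incq %rdi"
--             else:
--                 yield f"addq ${n}, %rdi"
--         elif command.startswith("<"):
--             if n == 1:
--                 yield "decq %rdi"
--             else:
--                 yield f"subq ${n}, %rdi"
--         elif command == '[':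
--             suffix = f"{i}_{jumps[i]}"
--             yield f"start_{suffix}:"
--             yield "cmpb $0, (%rdi)"
--             yield f"je end_{suffix}"
--         elif command == ']':
--             suffix = f"{jumps[i]}_{i}"
--             yield f"jmp start_{suffix}"
--             yield f"end_{suffix}:"
--         elif command.startswith("."):
--             yield "pushq %rdi"
--             yield "movzbq (%rdi), %rdi"
--             sequence = ["call putchar", "mov %rax, %rdi"] * n
--             yield from sequence[:-1]
--             yield "popq %rdi"
--         elif command.startswith(","):
--             yield "pushq %rdi"
--             yield from ["call getchar"] * n
--             yield "popq %rdi"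
--             yield "movb %al, (%rdi)"
--     yield "ret"
--     yield '.section .note.GNU-stack,"",@progbits'
-- ===== SOURCE B (Python) =====
-- def generate_x86_64_att(intermediate):
--     # Parse the flat command list into a bracket tree, then emit by walking the
--     # tree recursively; matched indices come from the tree, not a jump dict.
--
--     def parse(k):
--         # Consume nodes until an unmatched ']' or the end; return (nodes, stop index).
--         nodes = []
--         while k < len(intermediate):
--             c = intermediate[k]
--             if c == ']':
--                 return nodes, k
--             if c == '[':
--                 body, m = parse(k + 1)
--                 if m == len(intermediate):
--                     raise ValueError("unmatched '['")
--                 nodes.append(('loop', k, m, body))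
--                 k = m + 1
--             else:
--                 nodes.append(('leaf', k, c))
--                 k += 1
--         return nodes, k
--
--     def leaf_lines(c):
--         n = len(c)
--         if c.startswith("+"):
--             return ["incb (%rdi)"] if n == 1 else [f"addb ${n}, (%rdi)"]
--         if c.startswith("-"):
--             return ["decb (%rdi)"] if n == 1 else [f"subb ${n}, (%rdi)"]
--         if c.startswith(">"):
--             return ["incq %rdi"] if n == 1 else [f"addq ${n}, %rdi"]
--         if c.startswith("<"):
--             return ["decq %rdi"] if n == 1 else [f"subq ${n}, %rdi"]
--         if c.startswith("."):
--             out = ["pushq %rdi", "movzbq (%rdi), %rdi", "call putchar"]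
--             out += ["mov %rax, %rdi", "call putchar"] * (n - 1)
--             out.append("popq %rdi")
--             return out
--         if c.startswith(","):
--             return ["pushq %rdi"] + ["call getchar"] * n + ["popq %rdi", "movb %al, (%rdi)"]
--         return []
--
--     def emit(nodes):
--         for node in nodes:
--             if node[0] == 'leaf':
--                 yield from leaf_lines(node[2])
--             else:
--                 _, i, j, body = node
--                 s = f"{i}_{j}"
--                 yield f"start_{s}:"
--                 yield "cmpb $0, (%rdi)"
--                 yield f"je end_{s}"
--                 yield from emit(body)
--                 yield f"jmp start_{s}"
--                 yield f"end_{s}:"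
--
--     tree, end = parse(0)
--     if end != len(intermediate):
--         raise ValueError("unmatched ']'")
--
--     yield ".globl run"
--     yield ".type run, @function"
--     yield "run:"
--     yield from emit(tree)
--     yield "ret"
--     yield '.section .note.GNU-stack,"",@progbits'
-- ===== Notes on version B (the rewrite author's own statement) =====
-- stated objective: alternative
-- what changed: Replaces A's two flat passes (a stack-built jump-table dict, then an index-driven emission loop that looks matched brackets up in the dict) with a recursive-descent parse of the command list into a bracket tree and a recursive tree-walk emitter in which matching indices come from the tree structure itself; the '.' command's line sequence is built call-first instead of via sequence[:-1].
import Mathlib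
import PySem

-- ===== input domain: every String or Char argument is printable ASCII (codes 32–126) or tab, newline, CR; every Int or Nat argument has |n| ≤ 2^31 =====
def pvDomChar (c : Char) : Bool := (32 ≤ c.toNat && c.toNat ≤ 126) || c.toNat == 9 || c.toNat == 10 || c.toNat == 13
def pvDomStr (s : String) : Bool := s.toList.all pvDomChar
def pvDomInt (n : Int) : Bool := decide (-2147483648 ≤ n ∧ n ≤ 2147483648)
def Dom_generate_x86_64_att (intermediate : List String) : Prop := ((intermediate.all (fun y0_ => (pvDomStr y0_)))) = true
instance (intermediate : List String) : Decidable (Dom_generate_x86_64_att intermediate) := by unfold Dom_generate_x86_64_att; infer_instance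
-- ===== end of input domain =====

-- B replaces A's stack-built jump dict + flat indexed emission loop by a recursive-descent
-- parse into a bracket tree and a recursive tree-walk emitter (objective: alternative).

-- ===== PORT A =====
-- one step of the 'for i, command in enumerate(...)' loop of fill_jump_tables
def fillStep (st : PySem.Dict Int Int × List Int) (p : Int × String) :
    PySem.Dict Int Int × List Int :=
  if p.2 = "[" then (st.1, st.2 ++ [p.1])          -- stack.append(i)
  else if p.2 = "]" then
    match PySem.List.pop? st.2 (-1) with            -- j = stack.pop(); IndexError → none, excluded by Pre_
    | some (j, rest) => ((st.1.insert j p.1).insert p.1 j, rest)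
    | none => st
  else st

def fill_jump_tables (intermediate : List String) : PySem.Dict Int Int :=
  ((PySem.List.enumerate intermediate).foldl fillStep (PySem.Dict.empty, [])).1

-- the body of A's emission loop for one (i, command)
def linesA (jumps : PySem.Dict Int Int) (p : Int × String) : List String :=
  let i := p.1
  let command := p.2
  let n : Int := PySem.Str.len command
  if PySem.Str.startswith command "+" then
    (if n = 1 then ["incb (%rdi)"] else ["addb $" ++ PySem.Int.toStr n ++ ", (%rdi)"])
  else if PySem.Str.startswith command "-" then
    (if n = 1 then ["decb (%rdi)"] else ["subb $" ++ PySem.Int.toStr n ++ ", (%rdi)"])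
  else if PySem.Str.startswith command ">" then
    (if n = 1 then ["incq %rdi"] else ["addq $" ++ PySem.Int.toStr n ++ ", %rdi"])
  else if PySem.Str.startswith command "<" then
    (if n = 1 then ["decq %rdi"] else ["subq $" ++ PySem.Int.toStr n ++ ", %rdi"])
  else if command = "[" then
    -- jumps[i]: KeyError (missing key) is excluded by Pre_
    let suffix := PySem.Int.toStr i ++ "_" ++ PySem.Int.toStr (jumps.getD i 0)
    ["start_" ++ suffix ++ ":", "cmpb $0, (%rdi)", "je end_" ++ suffix]
  else if command = "]" then
    let suffix := PySem.Int.toStr (jumps.getD i 0) ++ "_" ++ PySem.Int.toStr i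
    ["jmp start_" ++ suffix, "end_" ++ suffix ++ ":"]
  else if PySem.Str.startswith command "." then
    -- sequence[:-1] is dropLast (exact for any list); n ≥ 1 here so toNat is exact
    ["pushq %rdi", "movzbq (%rdi), %rdi"]
      ++ (List.replicate n.toNat ["call putchar", "mov %rax, %rdi"]).flatten.dropLast
      ++ ["popq %rdi"]
  else if PySem.Str.startswith command "," then
    ["pushq %rdi"] ++ List.replicate n.toNat "call getchar"
      ++ ["popq %rdi", "movb %al, (%rdi)"]
  else []

def generate_x86_64_att (intermediate : List String) : List String :=
  let jumps := fill_jump_tables intermediate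
  [".globl run", ".type run, @function", "run:"]
    ++ (PySem.List.enumerate intermediate).flatMap (fun p => linesA jumps p)
    ++ ["ret", ".section .note.GNU-stack,\"\",@progbits"]

-- ===== PORT B =====
-- Source B's node list ('leaf', i, c) / ('loop', i, j, body), cons-encoded as one inductive
inductive BfTree where
  | nil : BfTree
  | leaf : Nat → String → BfTree → BfTree
  | loop : Nat → Nat → BfTree → BfTree → BfTree
deriving Repr, DecidableEq

-- Source B's parse(k); fuel (xs.length + 1 is always enough) replaces Python's unbounded recursion
def parseB (xs : List String) : Nat → Nat → BfTree × Nat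
  | 0, k => (.nil, k)
  | fuel+1, k =>
    if h : k < xs.length then
      let c := xs[k]
      if c = "]" then (.nil, k)
      else if c = "[" then
        let r1 := parseB xs fuel (k+1)
        -- Python raises ValueError "unmatched '['" when r1.2 = xs.length; excluded by Pre_
        let r2 := parseB xs fuel (r1.2+1)
        (.loop k r1.2 r1.1 r2.1, r2.2)
      else
        let r := parseB xs fuel (k+1)
        (.leaf k c r.1, r.2)
    else (.nil, k)

-- Source B's leaf_lines(c)
def linesB (c : String) : List String :=
  let n : Int := PySem.Str.len c
  if PySem.Str.startswith c "+" then
    (if n = 1 then ["incb (%rdi)"] else ["addb $" ++ PySem.Int.toStr n ++ ", (%rdi)"])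
  else if PySem.Str.startswith c "-" then
    (if n = 1 then ["decb (%rdi)"] else ["subb $" ++ PySem.Int.toStr n ++ ", (%rdi)"])
  else if PySem.Str.startswith c ">" then
    (if n = 1 then ["incq %rdi"] else ["addq $" ++ PySem.Int.toStr n ++ ", %rdi"])
  else if PySem.Str.startswith c "<" then
    (if n = 1 then ["decq %rdi"] else ["subq $" ++ PySem.Int.toStr n ++ ", %rdi"])
  else if PySem.Str.startswith c "." then
    -- out = [pushq, movzbq, call]; out += [mov, call] * (n-1); out.append(popq)
    ["pushq %rdi", "movzbq (%rdi), %rdi", "call putchar"]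
      ++ (List.replicate (n.toNat - 1) ["mov %rax, %rdi", "call putchar"]).flatten
      ++ ["popq %rdi"]
  else if PySem.Str.startswith c "," then
    ["pushq %rdi"] ++ List.replicate n.toNat "call getchar"
      ++ ["popq %rdi", "movb %al, (%rdi)"]
  else []

-- Source B's emit(nodes)
def emitT : BfTree → List String
  | .nil => []
  | .leaf _ c rest => linesB c ++ emitT rest
  | .loop i j body rest =>
    let s := PySem.Int.toStr (i : Int) ++ "_" ++ PySem.Int.toStr (j : Int)
    ["start_" ++ s ++ ":", "cmpb $0, (%rdi)", "je end_" ++ s]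
      ++ emitT body
      ++ ["jmp start_" ++ s, "end_" ++ s ++ ":"]
      ++ emitT rest

def generate_x86_64_att_alt (intermediate : List String) : List String :=
  let r := parseB intermediate (intermediate.length + 1) 0
  -- Python raises ValueError "unmatched ']'" when r.2 ≠ length; excluded by Pre_
  [".globl run", ".type run, @function", "run:"]
    ++ emitT r.1
    ++ ["ret", ".section .note.GNU-stack,\"\",@progbits"]

-- ===== PRECONDITION & SPEC =====
-- Pre_ excludes exactly the inputs with unbalanced brackets, on which A raises
-- (IndexError from stack.pop() on a stray ']', KeyError jumps[i] on an unmatched '[').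
def Pre_generate_x86_64_att (intermediate : List String) : Prop :=
  (∀ k, k ≤ intermediate.length →
      (intermediate.take k).count "]" ≤ (intermediate.take k).count "[")
  ∧ intermediate.count "[" = intermediate.count "]"

instance (intermediate : List String) : Decidable (Pre_generate_x86_64_att intermediate) := by
  unfold Pre_generate_x86_64_att; infer_instance

def pvWitness_generate_x86_64_att : List String := ["+++", "[", ">", ".", "<", "-", "]", ","]

def Spec_generate_x86_64_att (intermediate : List String) (out : List String) : Prop :=
  out = generate_x86_64_att_alt intermediate
instance (intermediate : List String) (out : List String) :
    Decidable (Spec_generate_x86_64_att intermediate out) := by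
  unfold Spec_generate_x86_64_att; infer_instance

-- ===== CLAIM (what is proved, stated in full; the proofs are below) =====
def Claim_equal_generate_x86_64_att : Prop :=
  ∀ (intermediate : List String), Dom_generate_x86_64_att intermediate →
    Pre_generate_x86_64_att intermediate →
    Spec_generate_x86_64_att intermediate (generate_x86_64_att intermediate)

-- ===== LEMMAS AND PROOFS =====

-- the flat (index, command) list a tree stands for
def toL : BfTree → List (Int × String)
  | .nil => []
  | .leaf i c rest => ((i : Int), c) :: toL rest
  | .loop i j body rest => ((i : Int), "[") :: (toL body ++ (((j : Int), "]") :: toL rest))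

-- the jump-table entries A's fold inserts while traversing the same commands
def dAfter (J : PySem.Dict Int Int) : BfTree → PySem.Dict Int Int
  | .nil => J
  | .leaf _ _ rest => dAfter J rest
  | .loop i j body rest =>
      dAfter (((dAfter J body).insert (i : Int) (j : Int)).insert (j : Int) (i : Int)) rest

-- well-formedness: leaves are never bracket commands
def wfT : BfTree → Prop
  | .nil => True
  | .leaf _ c rest => c ≠ "[" ∧ c ≠ "]" ∧ wfT rest
  | .loop _ _ body rest => wfT body ∧ wfT rest

-- the (open, close) index pairs of a tree
def pairsT : BfTree → List (Nat × Nat)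
  | .nil => []
  | .leaf _ _ rest => pairsT rest
  | .loop i j body rest => (i, j) :: (pairsT body ++ pairsT rest)


lemma enum_drop_cons (xs : List String) (k : Nat) (hk : k < xs.length) :
    (PySem.List.enumerate xs).drop k
      = ((k : Int), xs[k]) :: (PySem.List.enumerate xs).drop (k+1) := by
  have hl : k < (PySem.List.enumerate xs (0 : Int)).length := by
    rw [PySem.List.length_enumerate]; exact hk
  rw [show (PySem.List.enumerate xs : List (Int × String)) = PySem.List.enumerate xs (0 : Int) from rfl,
      List.drop_eq_getElem_cons hl, PySem.List.getElem_enumerate]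
  norm_num

lemma snd_enum_drop (xs : List String) (k : Nat) :
    ((PySem.List.enumerate xs).drop k).map (fun p => p.2) = xs.drop k := by
  rw [List.map_drop, PySem.List.map_snd_enumerate]

lemma count_snd_toL (t : BfTree) (h : wfT t) :
    ((toL t).map (fun p => p.2)).count "[" = ((toL t).map (fun p => p.2)).count "]" := by
  induction t with
  | nil => rfl
  | leaf i c rest ih =>
    obtain ⟨h1, h2, h3⟩ := h
    simp only [toL, List.map_cons, List.count_cons]
    rw [ih h3]
    simp [h1, h2]
  | loop i j body rest ihb ihr =>
    obtain ⟨h1, h2⟩ := h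
    simp only [toL, List.map_cons, List.map_append, List.count_cons, List.count_append]
    rw [ihb h1, ihr h2]
    simp
    omega

lemma fillStep_lbrack (J : PySem.Dict Int Int) (st : List Int) (i : Int) :
    fillStep (J, st) (i, "[") = (J, st ++ [i]) := by
  simp [fillStep]

lemma fillStep_rbrack (J : PySem.Dict Int Int) (st : List Int) (i j : Int) :
    fillStep (J, st ++ [j]) (i, "]") = ((J.insert j i).insert i j, st) := by
  simp [fillStep, PySem.List.pop?_last]

lemma fillStep_other (J : PySem.Dict Int Int) (st : List Int) (i : Int) (c : String)
    (h1 : c ≠ "[") (h2 : c ≠ "]") : fillStep (J, st) (i, c) = (J, st) := by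
  simp [fillStep, h1, h2]

-- the central induction: what parseB returns and how A's jump-table fold moves across it
lemma parse_main (xs : List String)
    (H : ∀ j : Nat, ((xs.drop j).count "[") ≤ ((xs.drop j).count "]")) :
    ∀ (fuel k : Nat), xs.length + 1 ≤ fuel + k → k ≤ xs.length →
      ((PySem.List.enumerate xs).drop k
          = toL (parseB xs fuel k).1 ++ (PySem.List.enumerate xs).drop (parseB xs fuel k).2)
      ∧ k ≤ (parseB xs fuel k).2
      ∧ (parseB xs fuel k).2 ≤ xs.length
      ∧ ((parseB xs fuel k).2 = xs.length ∨ xs[(parseB xs fuel k).2]? = some "]")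
      ∧ wfT (parseB xs fuel k).1
      ∧ (∀ (J : PySem.Dict Int Int) (st : List Int),
          (((PySem.List.enumerate xs).drop k).foldl fillStep (J, st))
            = (((PySem.List.enumerate xs).drop (parseB xs fuel k).2).foldl fillStep
                (dAfter J (parseB xs fuel k).1, st))) := by
  intro fuel
  induction fuel with
  | zero => intro k h1 h2; omega
  | succ f ih =>
    intro k h1 h2
    by_cases hk : k < xs.length
    · by_cases hc1 : xs[k] = "]"
      · have hp : parseB xs (f+1) k = (.nil, k) := by
          simp [parseB, hk, hc1]
        rw [hp]
        refine ⟨by simp [toL], le_refl _, h2, Or.inr ?_, trivial, fun J st => by simp [dAfter]⟩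
        rw [List.getElem?_eq_getElem hk, hc1]
      · by_cases hc2 : xs[k] = "["
        · -- loop case
          have ih1 := ih (k+1) (by omega) (by omega)
          set r1 := parseB xs f (k+1) with hr1
          obtain ⟨B0, Bk, Ble, Bstop, Bwf, B1⟩ := ih1
          have hm : r1.2 < xs.length := by
            rcases Nat.lt_or_ge r1.2 xs.length with h | h
            · exact h
            · exfalso
              have hlen : r1.2 = xs.length := by omega
              have hdrop2 : (PySem.List.enumerate xs).drop r1.2 = [] := by
                apply List.drop_eq_nil_of_le
                rw [PySem.List.length_enumerate]; omega
              have hsnd : xs.drop (k+1) = (toL r1.1).map (fun p => p.2) := by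
                rw [← snd_enum_drop, B0, hdrop2, List.append_nil]
              have hdk : xs.drop k = "[" :: xs.drop (k+1) :=
                hc2 ▸ List.drop_eq_getElem_cons hk
              have hcnt := count_snd_toL r1.1 Bwf
              have hH := H k
              rw [hdk, List.count_cons, List.count_cons, hsnd] at hH
              simp at hH
              omega
          have hstop1 : xs[r1.2] = "]" := by
            rcases Bstop with h | h
            · omega
            · rw [List.getElem?_eq_getElem hm] at h
              exact Option.some_injective _ h
          have ih2 := ih (r1.2+1) (by omega) (by omega)
          set r2 := parseB xs f (r1.2+1) with hr2
          obtain ⟨D0, Dk, Dle, Dstop, Dwf, D1⟩ := ih2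
          have hp : parseB xs (f+1) k = (.loop k r1.2 r1.1 r2.1, r2.2) := by
            simp [parseB, hk, hc2, ← hr1, ← hr2]
          rw [hp]
          have hC0 : (PySem.List.enumerate xs).drop k
              = toL (BfTree.loop k r1.2 r1.1 r2.1) ++ (PySem.List.enumerate xs).drop r2.2 := by
            rw [enum_drop_cons xs k hk, hc2, B0, enum_drop_cons xs r1.2 hm, hstop1, D0]
            simp [toL]
          refine ⟨hC0, by omega, Dle, Dstop, ⟨Bwf, Dwf⟩, ?_⟩
          intro J st
          rw [enum_drop_cons xs k hk, hc2, List.foldl_cons, fillStep_lbrack, B1,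
              enum_drop_cons xs r1.2 hm, hstop1, List.foldl_cons, fillStep_rbrack, D1]
          rfl
        · -- leaf case
          have ih1 := ih (k+1) (by omega) (by omega)
          set r1 := parseB xs f (k+1) with hr1
          obtain ⟨B0, Bk, Ble, Bstop, Bwf, B1⟩ := ih1
          have hp : parseB xs (f+1) k = (.leaf k xs[k] r1.1, r1.2) := by
            simp [parseB, hk, hc1, hc2, ← hr1]
          rw [hp]
          have hC0 : (PySem.List.enumerate xs).drop k
              = toL (BfTree.leaf k xs[k] r1.1) ++ (PySem.List.enumerate xs).drop r1.2 := by
            rw [enum_drop_cons xs k hk, B0]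
            simp [toL]
          refine ⟨hC0, by omega, Ble, Bstop, ⟨hc2, hc1, Bwf⟩, ?_⟩
          intro J st
          rw [enum_drop_cons xs k hk, List.foldl_cons, fillStep_other J st _ _ hc2 hc1, B1]
          rfl
    · have hkl : k = xs.length := by omega
      have hp : parseB xs (f+1) k = (.nil, k) := by
        simp [parseB, hk]
      rw [hp]
      exact ⟨by simp [toL], le_refl _, h2, Or.inl hkl, trivial, fun J st => by simp [dAfter]⟩

lemma pairsT_mem_idx {t : BfTree} {o c : Nat} (h : (o, c) ∈ pairsT t) :
    ((o : Int) ∈ (toL t).map (fun p => p.1)) ∧ ((c : Int) ∈ (toL t).map (fun p => p.1)) := by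
  induction t with
  | nil => simp [pairsT] at h
  | leaf i s rest ih =>
    simp only [pairsT] at h
    have := ih h
    simp only [toL, List.map_cons, List.mem_cons]
    tauto
  | loop i j body rest ihb ihr =>
    simp only [pairsT, List.mem_cons, List.mem_append] at h
    simp only [toL, List.map_cons, List.map_append, List.mem_cons, List.mem_append]
    rcases h with h | h | h
    · simp only [Prod.mk.injEq] at h
      obtain ⟨rfl, rfl⟩ := h
      have h1 : (o : Int) = (o : Int) := rfl
      have h2 : (c : Int) = (c : Int) := rfl
      exact ⟨by tauto, by tauto⟩
    · have := ihb h; tauto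
    · have := ihr h; tauto

lemma dAfter_getD_of_not_mem (t : BfTree) :
    ∀ (J : PySem.Dict Int Int) (x : Int), x ∉ (toL t).map (fun p => p.1) →
      (dAfter J t).getD x 0 = J.getD x 0 := by
  induction t with
  | nil => intro J x _; rfl
  | leaf i c rest ih =>
    intro J x hx
    simp only [toL, List.map_cons, List.mem_cons] at hx
    exact ih J x (fun h => hx (Or.inr h))
  | loop i j body rest ihb ihr =>
    intro J x hx
    simp only [toL, List.map_cons, List.map_append, List.mem_cons, List.mem_append] at hx
    have hxi : x ≠ (i : Int) := fun h => hx (Or.inl h)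
    have hxb : x ∉ (toL body).map (fun p => p.1) := fun h => hx (Or.inr (Or.inl h))
    have hxj : x ≠ (j : Int) := fun h => hx (Or.inr (Or.inr (Or.inl h)))
    have hxr : x ∉ (toL rest).map (fun p => p.1) := fun h => hx (Or.inr (Or.inr (Or.inr h)))
    simp only [dAfter]
    rw [ihr _ x hxr, PySem.Dict.getD_insert, if_neg hxj, PySem.Dict.getD_insert, if_neg hxi,
        ihb _ x hxb]

lemma dAfter_good (t : BfTree) :
    ∀ (J : PySem.Dict Int Int), ((toL t).map (fun p => p.1)).Nodup →
      ∀ o c, (o, c) ∈ pairsT t →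
        (dAfter J t).getD (o : Int) 0 = (c : Int) ∧ (dAfter J t).getD (c : Int) 0 = (o : Int) := by
  induction t with
  | nil => intro J _ o c h; simp [pairsT] at h
  | leaf i s rest ih =>
    intro J hnd o c h
    simp only [toL, List.map_cons, List.nodup_cons] at hnd
    exact ih J hnd.2 o c h
  | loop i j body rest ihb ihr =>
    intro J hnd o c h
    simp only [toL, List.map_cons, List.map_append, List.nodup_cons, List.nodup_append,
      List.mem_cons, List.mem_append] at hnd
    obtain ⟨hni, hndb, ⟨hjnr, hndr⟩, hdis⟩ := hnd
    have hij : (i : Int) ≠ (j : Int) := fun hh => hni (Or.inr (Or.inl hh))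
    have hinb : (i : Int) ∉ (toL body).map (fun p => p.1) := fun hh => hni (Or.inl hh)
    have hinr : (i : Int) ∉ (toL rest).map (fun p => p.1) := fun hh => hni (Or.inr (Or.inr hh))
    have hjnb : (j : Int) ∉ (toL body).map (fun p => p.1) := fun hh =>
      (hdis _ hh _ (Or.inl rfl)) rfl
    have hdisj : ∀ x, x ∈ (toL body).map (fun p => p.1) → x ∉ (toL rest).map (fun p => p.1) :=
      fun x hxb hxr => (hdis _ hxb _ (Or.inr hxr)) rfl
    simp only [dAfter]
    set J' := ((dAfter J body).insert (i : Int) (j : Int)).insert (j : Int) (i : Int) with hJ'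
    simp only [pairsT, List.mem_cons, List.mem_append] at h
    rcases h with h | h | h
    · obtain ⟨ho, hc⟩ : o = i ∧ c = j := Prod.mk.injEq .. ▸ h
      subst ho; subst hc
      constructor
      · rw [dAfter_getD_of_not_mem _ _ _ hinr, hJ', PySem.Dict.getD_insert, if_neg hij,
          PySem.Dict.getD_insert, if_pos rfl]
      · rw [dAfter_getD_of_not_mem _ _ _ hjnr, hJ', PySem.Dict.getD_insert, if_pos rfl]
    · obtain ⟨hob, hcb⟩ := pairsT_mem_idx h
      have hor : (o : Int) ∉ (toL rest).map (fun p => p.1) := hdisj _ hob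
      have hcr : (c : Int) ∉ (toL rest).map (fun p => p.1) := hdisj _ hcb
      have hoi : (o : Int) ≠ (i : Int) := fun hh => hinb (hh ▸ hob)
      have hoj : (o : Int) ≠ (j : Int) := fun hh => hjnb (hh ▸ hob)
      have hci : (c : Int) ≠ (i : Int) := fun hh => hinb (hh ▸ hcb)
      have hcj : (c : Int) ≠ (j : Int) := fun hh => hjnb (hh ▸ hcb)
      have hbody := ihb (J) hndb o c h
      constructor
      · rw [dAfter_getD_of_not_mem _ _ _ hor, hJ', PySem.Dict.getD_insert, if_neg hoj,
          PySem.Dict.getD_insert, if_neg hoi]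
        exact hbody.1
      · rw [dAfter_getD_of_not_mem _ _ _ hcr, hJ', PySem.Dict.getD_insert, if_neg hcj,
          PySem.Dict.getD_insert, if_neg hci]
        exact hbody.2
    · exact ihr J' hndr o c h

lemma flatten_replicate_dropLast (a b : String) :
    ∀ n : Nat, ((List.replicate (n+1) [a, b]).flatten).dropLast
      = a :: (List.replicate n [b, a]).flatten := by
  intro n
  induction n with
  | zero => rfl
  | succ m ih =>
    have hne : (List.replicate (m+1) [a, b]).flatten ≠ [] := by
      simp [List.replicate_succ]
    calc ((List.replicate (m+2) [a, b]).flatten).dropLast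
        = (a :: b :: (List.replicate (m+1) [a, b]).flatten).dropLast := by
          simp [List.replicate_succ]
      _ = a :: b :: ((List.replicate (m+1) [a, b]).flatten).dropLast := by
          rw [List.dropLast_cons_of_ne_nil (by simp), List.dropLast_cons_of_ne_nil hne]
      _ = a :: b :: a :: (List.replicate m [b, a]).flatten := by rw [ih]
      _ = a :: (List.replicate (m+1) [b, a]).flatten := by simp [List.replicate_succ]

lemma linesA_eq_linesB (J : PySem.Dict Int Int) (i : Int) (c : String)
    (h1 : c ≠ "[") (h2 : c ≠ "]") : linesA J (i, c) = linesB c := by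
  by_cases g1 : PySem.Chars.startswith c.toList ['+'] = true
  · simp [linesA, linesB, g1]
  by_cases g2 : PySem.Chars.startswith c.toList ['-'] = true
  · simp [linesA, linesB, g1, g2]
  by_cases g3 : PySem.Chars.startswith c.toList ['>'] = true
  · simp [linesA, linesB, g1, g2, g3]
  by_cases g4 : PySem.Chars.startswith c.toList ['<'] = true
  · simp [linesA, linesB, g1, g2, g3, g4]
  by_cases g5 : PySem.Chars.startswith c.toList ['.'] = true
  · -- the "." branch: A's sequence[:-1] vs B's call-first decomposition
    have hpre := (PySem.Chars.startswith_iff _ _).1 g5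
    have hlen : 1 ≤ c.toList.length := hpre.length_le
    have hlen' : c.toList.length = c.length := by simp
    obtain ⟨m, hm⟩ : ∃ m, c.length = m + 1 := ⟨c.length - 1, by omega⟩
    simp [linesA, linesB, g1, g2, g3, g4, g5, h1, h2, hm, flatten_replicate_dropLast]
  by_cases g6 : PySem.Chars.startswith c.toList [','] = true
  · simp [linesA, linesB, g1, g2, g3, g4, g5, g6, h1, h2]
  · simp [linesA, linesB, g1, g2, g3, g4, g5, g6, h1, h2]

lemma emit_eq_flatMap (J : PySem.Dict Int Int) (t : BfTree) (hwf : wfT t)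
    (hJ : ∀ o c, (o, c) ∈ pairsT t →
      J.getD (o : Int) 0 = (c : Int) ∧ J.getD (c : Int) 0 = (o : Int)) :
    emitT t = (toL t).flatMap (fun p => linesA J p) := by
  induction t with
  | nil => rfl
  | leaf i c rest ih =>
    obtain ⟨h1, h2, h3⟩ := hwf
    simp only [emitT, toL, List.flatMap_cons]
    rw [ih h3 (fun o c h => hJ o c h), linesA_eq_linesB J (i : Int) c h1 h2]
  | loop i j body rest ihb ihr =>
    obtain ⟨hwb, hwr⟩ := hwf
    have hJb : ∀ o c, (o, c) ∈ pairsT body →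
        J.getD (o : Int) 0 = (c : Int) ∧ J.getD (c : Int) 0 = (o : Int) := by
      intro o c h; exact hJ o c (by simp [pairsT, h])
    have hJr : ∀ o c, (o, c) ∈ pairsT rest →
        J.getD (o : Int) 0 = (c : Int) ∧ J.getD (c : Int) 0 = (o : Int) := by
      intro o c h; exact hJ o c (by simp [pairsT, h])
    have hself := hJ i j (by simp [pairsT])
    simp only [emitT, toL, List.flatMap_cons, List.flatMap_append]
    rw [ihb hwb hJb, ihr hwr hJr]
    have e1 : PySem.Chars.startswith ['['] ['+'] = false := rfl
    have e2 : PySem.Chars.startswith ['['] ['-'] = false := rfl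
    have e3 : PySem.Chars.startswith ['['] ['>'] = false := rfl
    have e4 : PySem.Chars.startswith ['['] ['<'] = false := rfl
    have e5 : PySem.Chars.startswith [']'] ['+'] = false := rfl
    have e6 : PySem.Chars.startswith [']'] ['-'] = false := rfl
    have e7 : PySem.Chars.startswith [']'] ['>'] = false := rfl
    have e8 : PySem.Chars.startswith [']'] ['<'] = false := rfl
    have hA1 : linesA J ((i : Int), "[")
        = ["start_" ++ (PySem.Int.toStr (i : Int) ++ "_" ++ PySem.Int.toStr (J.getD (i : Int) 0)) ++ ":",
           "cmpb $0, (%rdi)",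
           "je end_" ++ (PySem.Int.toStr (i : Int) ++ "_" ++ PySem.Int.toStr (J.getD (i : Int) 0))] := by
      simp [linesA, e1, e2, e3, e4]
    have hA2 : linesA J ((j : Int), "]")
        = ["jmp start_" ++ (PySem.Int.toStr (J.getD (j : Int) 0) ++ "_" ++ PySem.Int.toStr (j : Int)),
           "end_" ++ (PySem.Int.toStr (J.getD (j : Int) 0) ++ "_" ++ PySem.Int.toStr (j : Int)) ++ ":"] := by
      simp [linesA, e5, e6, e7, e8]
    rw [hA1, hA2, hself.1, hself.2]
    simp

-- ===== VERDICT (by name: the statement is the Claim_ definition above) =====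
theorem generate_x86_64_att_spec : Claim_equal_generate_x86_64_att := by
  intro xs _hdom hpre
  unfold Spec_generate_x86_64_att
  obtain ⟨hp1, hp2⟩ := hpre
  have H : ∀ j : Nat, ((xs.drop j).count "[") ≤ ((xs.drop j).count "]") := by
    intro j
    by_cases hj : j ≤ xs.length
    · have h1 := hp1 j hj
      have e1 : (xs.take j).count "[" + (xs.drop j).count "[" = xs.count "[" := by
        conv_rhs => rw [← List.take_append_drop j xs]
        rw [List.count_append]
      have e2 : (xs.take j).count "]" + (xs.drop j).count "]" = xs.count "]" := by
        conv_rhs => rw [← List.take_append_drop j xs]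
        rw [List.count_append]
      omega
    · rw [List.drop_eq_nil_of_le (by omega)]
      simp
  have main := parse_main xs H (xs.length + 1) 0 (by omega) (by omega)
  set r := parseB xs (xs.length + 1) 0 with hr
  obtain ⟨C0, _, hle, hstop, hwf, C1⟩ := main
  rw [List.drop_zero] at C0
  -- the parse consumes everything: a stop at "]" would contradict the prefix balance
  have hmlen : r.2 = xs.length := by
    rcases hstop with h | h
    · exact h
    · exfalso
      have hm : r.2 < xs.length := by
        by_contra h'
        rw [List.getElem?_eq_none (by omega)] at h
        simp at h
      have hgr : xs[r.2] = "]" := by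
        rw [List.getElem?_eq_getElem hm] at h
        exact Option.some_injective _ h
      have hsnd : xs = (toL r.1).map (fun p => p.2) ++ xs.drop r.2 := by
        have := congrArg (List.map (fun p : Int × String => p.2)) C0
        rw [PySem.List.map_snd_enumerate, List.map_append, snd_enum_drop] at this
        exact this
      have hdm : xs.drop r.2 = "]" :: xs.drop (r.2 + 1) := hgr ▸ List.drop_eq_getElem_cons hm
      have hcnt := count_snd_toL r.1 hwf
      have hH := H (r.2 + 1)
      have hx1 : xs.count "[" = ((toL r.1).map (fun p => p.2)).count "["
          + (xs.drop (r.2+1)).count "[" := by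
        conv_lhs => rw [hsnd]
        rw [List.count_append, hdm, List.count_cons]
        simp
      have hx2 : xs.count "]" = ((toL r.1).map (fun p => p.2)).count "]"
          + (xs.drop (r.2+1)).count "]" + 1 := by
        conv_lhs => rw [hsnd]
        rw [List.count_append, hdm, List.count_cons]
        simp
        omega
      omega
  have hdrop2 : (PySem.List.enumerate xs).drop r.2 = [] := by
    apply List.drop_eq_nil_of_le
    rw [PySem.List.length_enumerate]; omega
  have htoL : toL r.1 = PySem.List.enumerate xs := by
    rw [C0, hdrop2, List.append_nil]
  -- A's jump table is exactly dAfter empty r.1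
  have hJ : fill_jump_tables xs = dAfter PySem.Dict.empty r.1 := by
    unfold fill_jump_tables
    have := C1 PySem.Dict.empty []
    rw [List.drop_zero, hdrop2] at this
    rw [this]
    rfl
  -- nodup indices
  have hnd : ((toL r.1).map (fun p => p.1)).Nodup := by
    rw [htoL]
    rw [show (PySem.List.enumerate xs : List (Int × String)) = PySem.List.enumerate xs (0 : Int) from rfl,
      PySem.List.map_fst_enumerate]
    exact PySem.List.nodup_pyRange_one _ _
  have hgood := dAfter_good r.1 PySem.Dict.empty hnd
  have hemit := emit_eq_flatMap (dAfter PySem.Dict.empty r.1) r.1 hwf hgood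
  simp only [generate_x86_64_att, generate_x86_64_att_alt]
  rw [← hr, hJ, hemit, htoL]
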